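-- pv_equiv track=rewrite | github.com/hyewonk815/Algorithm | 프로그래머스/2/87946. 피로도/피로도.py | solution
-- ===== SOURCE A (Python) =====
-- from itertools import permutations
--
-- def solution(k, dungeons):
--     answer = 0
--     for order in permutations(dungeons, len(dungeons)):
--         t = k
--         tired = 0
--         for i in range(len(dungeons)):
--             if (t >= order[i][0]):
--                 t -= order[i][1]
--                 tired += 1
--         answer = max(answer, tired)
--     return answer
-- ===== SOURCE B (Python) =====
-- def solution(k, dungeons):
--     # bitmask subset DP: feasible(mask) = max remaining energy after clearing exactly
--     # the dungeons in mask (None if that set cannot be cleared in any order);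
--     # the answer is the largest popcount of a feasible mask.
--     n = len(dungeons)
--     memo = {}
--
--     def feasible(mask):
--         if mask == 0:
--             return k
--         if mask in memo:
--             return memo[mask]
--         res = None
--         for i in range(n):
--             if mask >> i & 1:
--                 prev = feasible(mask ^ (1 << i))
--                 if prev is not None and prev >= dungeons[i][0]:
--                     v = prev - dungeons[i][1]
--                     if res is None or res < v:
--                         res = v
--         memo[mask] = res
--         return res
--
--     def popcount(m):
--         return 0 if m == 0 else m % 2 + popcount(m // 2)
--
--     answer = 0
--     for mask in range(1 << n):
--         if feasible(mask) is not None: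
--             answer = max(answer, popcount(mask))
--     return answer
-- ===== Notes on version B (the rewrite author's own statement) =====
-- stated objective: faster
-- what changed: Replaces exhaustive enumeration of all n! permutations (each fully simulated with skipping) by a bitmask subset DP that memoizes, for every subset of dungeons, the maximum remaining energy with which it can be fully cleared, and returns the largest popcount of a feasible subset.
-- outside the precondition, e.g. on solution(0, [[5]]): A returns 0, B returns 0
import Mathlib
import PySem

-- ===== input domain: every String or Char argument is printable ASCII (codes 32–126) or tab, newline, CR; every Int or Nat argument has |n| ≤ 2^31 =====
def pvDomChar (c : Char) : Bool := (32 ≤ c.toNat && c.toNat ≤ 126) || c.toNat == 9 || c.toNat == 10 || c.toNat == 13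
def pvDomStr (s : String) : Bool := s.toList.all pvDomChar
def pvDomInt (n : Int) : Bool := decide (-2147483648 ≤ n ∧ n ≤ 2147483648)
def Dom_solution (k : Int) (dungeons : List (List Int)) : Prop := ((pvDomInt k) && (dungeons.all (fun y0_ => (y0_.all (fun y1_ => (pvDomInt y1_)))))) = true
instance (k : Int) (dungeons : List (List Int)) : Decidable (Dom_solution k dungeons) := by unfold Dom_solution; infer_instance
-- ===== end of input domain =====

-- B replaces A's enumeration of all n! dungeon orders by a bitmask subset DP memoizing,
-- for every subset, the maximum remaining energy with which it can be cleared (faster).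

-- ===== PORT A =====
-- order[i][j] for a dungeon row; exact on Pre_ (every row has length ≥ 2, j ∈ {0,1})
def pvGet (d : List Int) (i : Int) : Int := (PySem.List.pyGet? d i).getD 0

def solution (k : Int) (dungeons : List (List Int)) : Int :=
  (PySem.List.permutations dungeons dungeons.length).foldl
    (fun answer order =>
      max answer
        (((List.range dungeons.length).foldl
          (fun s i =>
            -- order[i]: 0 ≤ i < len(order), never raises, so List.getD is exact
            if s.1 ≥ pvGet (order.getD i []) 0 then
              (s.1 - pvGet (order.getD i []) 1, s.2 + 1)
            else s)
          (k, (0 : Int))).2))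
    0

-- ===== PORT B =====
-- popcount(m) of Source B: 0 if m == 0 else m % 2 + popcount(m // 2)
def popcnt : Nat → Nat
  | 0 => 0
  | m + 1 => (m + 1) % 2 + popcnt ((m + 1) / 2)
decreasing_by omega

-- feasible(mask) of Source B (memo dict dropped; fuel = mask makes the recursion structural:
-- every recursive call clears a set bit, so its argument is < mask ≤ fuel)
def bFeasF (k : Int) (ds : List (List Int)) : Nat → Nat → Option Int
  | _, 0 => some k
  | 0, _ + 1 => none   -- fuel exhausted: unreachable when fuel ≥ mask
  | fuel + 1, m + 1 =>
    (List.range ds.length).foldl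
      (fun res i =>
        if (m + 1).testBit i then      -- mask >> i & 1
          match bFeasF k ds fuel ((m + 1) ^^^ (1 <<< i)) with
          | some prev =>
            if prev ≥ pvGet (ds.getD i []) 0 then   -- dungeons[i]: 0 ≤ i < n, exact
              let v := prev - pvGet (ds.getD i []) 1
              match res with
              | none => some v
              | some b => if b < v then some v else res
            else res
          | none => res
        else res)
      none

def solution_alt (k : Int) (dungeons : List (List Int)) : Int :=
  (List.range (2 ^ dungeons.length)).foldl
    (fun answer mask =>
      if (bFeasF k dungeons mask mask).isSome then
        max answer ((popcnt mask : Int))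
      else answer)
    0

-- ===== PRECONDITION & SPEC =====
-- Pre_ restricts to the problem's natural domain: every dungeon is a (min-required, cost)
-- pair (length ≥ 2); with shorter rows the Python A raises IndexError on every input except
-- degenerate ones where a short row is never clearable in any order.
def Pre_solution (k : Int) (dungeons : List (List Int)) : Prop :=
  ∀ d ∈ dungeons, 2 ≤ d.length
instance (k : Int) (dungeons : List (List Int)) : Decidable (Pre_solution k dungeons) := by
  unfold Pre_solution; infer_instance

def pvWitness_solution : Int × List (List Int) := (80, [[80, 20], [50, 40], [30, 10]])

def Spec_solution (k : Int) (dungeons : List (List Int)) (out : Int) : Prop := out = solution_alt k dungeons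
instance (k : Int) (dungeons : List (List Int)) (out : Int) : Decidable (Spec_solution k dungeons out) := by unfold Spec_solution; infer_instance

-- ===== CLAIM (what is proved, stated in full; the proofs are below) =====
def Claim_equal_solution : Prop := ∀ (k : Int) (dungeons : List (List Int)), Dom_solution k dungeons → Pre_solution k dungeons → Spec_solution k dungeons (solution k dungeons)

-- ===== LEMMAS AND PROOFS =====

-- ---- A's inner simulation as a fold over the order list ----
def step (s : Int × Int) (d : List Int) : Int × Int :=
  if s.1 ≥ pvGet d 0 then (s.1 - pvGet d 1, s.2 + 1) else s

def cnt (k : Int) (o : List (List Int)) : Int := (o.foldl step (k, 0)).2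

theorem foldl_range_getD {α β : Type} (f : β → α → β) (d : α) :
    ∀ (l : List α) (init : β),
      (List.range l.length).foldl (fun s i => f s (l.getD i d)) init = l.foldl f init := by
  intro l
  induction l with
  | nil => intro init; simp
  | cons x xs ih =>
    intro init
    simp only [List.length_cons, List.range_succ_eq_map, List.foldl_cons, List.foldl_map,
      List.getD_cons_zero, List.getD_cons_succ]
    exact ih (f init x)

theorem inner_eq_cnt (k : Int) (order : List (List Int)) (n : Nat) (h : order.length = n) :
    ((List.range n).foldl
      (fun s i =>
        if s.1 ≥ pvGet (order.getD i []) 0 then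
          (s.1 - pvGet (order.getD i []) 1, s.2 + 1)
        else s)
      (k, (0 : Int))).2 = cnt k order := by
  subst h
  rw [show (fun (s : Int × Int) (i : Nat) =>
        if s.1 ≥ pvGet (order.getD i []) 0 then
          (s.1 - pvGet (order.getD i []) 1, s.2 + 1)
        else s) = (fun s i => step s (order.getD i [])) from rfl,
      foldl_range_getD step [] order (k, 0)]
  rfl

theorem foldl_step_snd (o : List (List Int)) : ∀ (t c : Int),
    (o.foldl step (t, c)).2 = c + (o.foldl step (t, 0)).2 := by
  induction o with
  | nil => intro t c; simp
  | cons d o ih =>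
    intro t c
    simp only [List.foldl_cons, step]
    split_ifs with h
    · rw [ih (t - pvGet d 1) (c + 1), ih (t - pvGet d 1) (0 + 1)]; ring
    · exact ih t c

theorem cnt_cons (k : Int) (d : List Int) (o : List (List Int)) :
    cnt k (d :: o) = if k ≥ pvGet d 0 then 1 + cnt (k - pvGet d 1) o else cnt k o := by
  simp only [cnt, List.foldl_cons, step]
  split_ifs with h
  · rw [foldl_step_snd o (k - pvGet d 1) (0 + 1)]; ring
  · rfl

theorem cnt_nonneg (o : List (List Int)) : ∀ k, 0 ≤ cnt k o := by
  induction o with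
  | nil => intro k; simp [cnt]
  | cons d o ih =>
    intro k
    rw [cnt_cons]
    split_ifs
    · have := ih (k - pvGet d 1); omega
    · exact ih k

-- ---- picking one element: (element, remaining list) ----
def selections {α : Type} : List α → List (α × List α)
  | [] => []
  | x :: xs => (x, xs) :: (selections xs).map (fun p => (p.1, x :: p.2))

theorem selections_length {α : Type} : ∀ {l : List α} {p : α × List α},
    p ∈ selections l → p.2.length + 1 = l.length := by
  intro l
  induction l with
  | nil => intro p h; simp [selections] at h
  | cons x xs ih =>
    intro p h
    simp only [selections, List.mem_cons, List.mem_map] at h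
    rcases h with h | ⟨q, hq, rfl⟩
    · subst h; simp
    · have := ih hq; simp [← this]

theorem mem_selections_iff {α : Type} (d0 : α) :
    ∀ {xs : List α} {d : α} {rest : List α},
      (d, rest) ∈ selections xs ↔
        ∃ i : Nat, i < xs.length ∧ d = xs.getD i d0 ∧ rest = xs.eraseIdx i := by
  intro xs
  induction xs with
  | nil => intro d rest; simp [selections]
  | cons x t ih =>
    intro d rest
    simp only [selections, List.mem_cons, List.mem_map, Prod.mk.injEq]
    constructor
    · rintro (⟨rfl, rfl⟩ | ⟨⟨e, ys⟩, hq, rfl, rfl⟩)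
      · exact ⟨0, by simp, by simp, by simp⟩
      · obtain ⟨i, hi, rfl, rfl⟩ := (ih (d := e) (rest := ys)).mp hq
        exact ⟨i + 1, by simpa using hi, by simp, by simp⟩
    · rintro ⟨i, hi, rfl, rfl⟩
      cases i with
      | zero => left; simp
      | succ j =>
        right
        refine ⟨(t.getD j d0, t.eraseIdx j), (ih).mpr ⟨j, by simpa using hi, rfl, rfl⟩, by simp, by simp⟩

-- ---- characterisation of PySem.List.permutations xs (len xs) ----
theorem mem_permutations_cons {x : List Int} {t : List (List Int)} {o : List (List Int)} :
    o ∈ PySem.List.permutations (x :: t) (x :: t).length ↔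
      ∃ d rest, (d, rest) ∈ selections (x :: t) ∧
        ∃ o', o' ∈ PySem.List.permutations rest rest.length ∧ o = d :: o' := by
  have hlen : (x :: t).length = t.length + 1 := by simp
  rw [hlen, PySem.List.permutations]
  constructor
  · intro h
    rcases List.mem_flatMap.mp h with ⟨i, hi, ho⟩
    have hilt : i < (x :: t).length := List.mem_range.mp hi
    rw [List.getElem?_eq_getElem hilt] at ho
    rcases List.mem_map.mp ho with ⟨o', ho', rfl⟩
    refine ⟨(x :: t)[i], (x :: t).eraseIdx i,
      (mem_selections_iff []).mpr ⟨i, hilt, by simp [List.getD_eq_getElem?_getD, List.getElem?_eq_getElem hilt], rfl⟩,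
      o', ?_, rfl⟩
    have : ((x :: t).eraseIdx i).length = t.length := by
      rw [List.length_eraseIdx_of_lt hilt]; simp
    rwa [this]
  · rintro ⟨d, rest, hsel, o', ho', rfl⟩
    obtain ⟨i, hilt, hd, hrest⟩ := (mem_selections_iff []).mp hsel
    refine List.mem_flatMap.mpr ⟨i, List.mem_range.mpr hilt, ?_⟩
    rw [List.getElem?_eq_getElem hilt]
    have hdl : d = (x :: t)[i] := by
      rw [hd, List.getD_eq_getElem?_getD, List.getElem?_eq_getElem hilt]; rfl
    have hrl : rest.length = t.length := by
      rw [hrest, List.length_eraseIdx_of_lt hilt]; simp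
    subst hrest
    rw [← hrl]
    exact List.mem_map.mpr ⟨o', ho', by rw [hdl]⟩

theorem perms_ne_nil : ∀ (n : Nat) (xs : List (List Int)), xs.length = n →
    PySem.List.permutations xs xs.length ≠ [] := by
  intro n
  induction n with
  | zero =>
    intro xs h
    have : xs = [] := List.eq_nil_of_length_eq_zero h
    subst this
    simp
  | succ m ih =>
    intro xs h
    cases xs with
    | nil => simp at h
    | cons x t =>
      obtain ⟨o', ho'⟩ := List.exists_mem_of_ne_nil _ (ih t (by simpa using h) )
      intro hnil
      have : x :: o' ∈ PySem.List.permutations (x :: t) (x :: t).length :=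
        mem_permutations_cons.mpr ⟨x, t, by simp [selections], o', ho', rfl⟩
      rw [hnil] at this
      simp at this

-- ---- B's algorithm behind the proofs: backtracking value bt ----
def bt (k : Int) (dungeons : List (List Int)) : Int :=
  (selections dungeons).attach.foldl
    (fun best p =>
      if k ≥ pvGet p.1.1 0 then max best (1 + bt (k - pvGet p.1.1 1) p.1.2) else best)
    0
termination_by dungeons.length
decreasing_by
  have h := selections_length p.2
  simp_all; omega

def altF (k : Int) : Int → (List Int × List (List Int)) → Int := fun best q =>
  if k ≥ pvGet q.1 0 then max best (1 + bt (k - pvGet q.1 1) q.2) else best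

theorem bt_eq (k : Int) (ds : List (List Int)) :
    bt k ds = (selections ds).foldl (altF k) 0 := by
  rw [bt]
  exact List.foldl_attach (l := selections ds) (b := 0)
    (f := fun best q =>
      if k ≥ pvGet q.1 0 then max best (1 + bt (k - pvGet q.1 1) q.2) else best)

theorem altF_init_le (k : Int) :
    ∀ (l : List (List Int × List (List Int))) (a : Int), a ≤ l.foldl (altF k) a := by
  intro l
  induction l with
  | nil => intro a; simp
  | cons q l ih =>
    intro a
    simp only [List.foldl_cons, altF]
    split_ifs
    · exact le_trans (le_max_left _ _) (ih _)
    · exact ih a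

theorem altF_le_of_mem (k : Int) {l : List (List Int × List (List Int))}
    {q : List Int × List (List Int)} (hq : q ∈ l) (hp : k ≥ pvGet q.1 0) :
    ∀ a, 1 + bt (k - pvGet q.1 1) q.2 ≤ l.foldl (altF k) a := by
  induction l with
  | nil => simp at hq
  | cons r l ih =>
    intro a
    simp only [List.foldl_cons]
    rcases List.mem_cons.mp hq with rfl | hmem
    · show 1 + bt (k - pvGet q.1 1) q.2 ≤ l.foldl (altF k) (altF k a q)
      have : 1 + bt (k - pvGet q.1 1) q.2 ≤ altF k a q := by
        simp only [altF, if_pos hp]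
        exact le_max_right _ _
      exact le_trans this (altF_init_le k l _)
    · exact ih hmem _

theorem altF_le (k : Int) {l : List (List Int × List (List Int))} {M : Int}
    (h : ∀ q ∈ l, k ≥ pvGet q.1 0 → 1 + bt (k - pvGet q.1 1) q.2 ≤ M) :
    ∀ a, a ≤ M → l.foldl (altF k) a ≤ M := by
  induction l with
  | nil => intro a ha; simpa
  | cons q l ih =>
    intro a ha
    simp only [List.foldl_cons]
    refine ih (fun r hr => h r (List.mem_cons_of_mem _ hr)) _ ?_
    simp only [altF]
    split_ifs with hp
    · exact max_le ha (h q List.mem_cons_self hp)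
    · exact ha

-- ---- A's outer loop over permutations ----
def maxF (k : Int) : Int → List (List Int) → Int := fun a o => max a (cnt k o)

theorem maxF_init_le (k : Int) :
    ∀ (l : List (List (List Int))) (a : Int), a ≤ l.foldl (maxF k) a := by
  intro l
  induction l with
  | nil => intro a; simp
  | cons o l ih =>
    intro a
    exact le_trans (le_max_left a (cnt k o)) (ih _)

theorem maxF_le_of_mem (k : Int) {l : List (List (List Int))} {o : List (List Int)}
    (ho : o ∈ l) : ∀ a, cnt k o ≤ l.foldl (maxF k) a := by
  induction l with
  | nil => simp at ho
  | cons o' l ih =>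
    intro a
    simp only [List.foldl_cons]
    rcases List.mem_cons.mp ho with rfl | hmem
    · exact le_trans (le_max_right _ _) (maxF_init_le k l _)
    · exact ih hmem _

theorem maxF_le (k : Int) {l : List (List (List Int))} {M : Int}
    (h : ∀ o ∈ l, cnt k o ≤ M) : ∀ a, a ≤ M → l.foldl (maxF k) a ≤ M := by
  induction l with
  | nil => intro a ha; simpa
  | cons o l ih =>
    intro a ha
    exact ih (fun o' ho' => h o' (List.mem_cons_of_mem _ ho')) _
      (max_le ha (h o List.mem_cons_self))

def maxA (k : Int) (ds : List (List Int)) : Int :=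
  (PySem.List.permutations ds ds.length).foldl (maxF k) 0

theorem solution_eq_maxA (k : Int) (ds : List (List Int)) : solution k ds = maxA k ds := by
  unfold solution maxA maxF
  refine PySem.List.foldl_congr_mem _ _ _ _ (fun a o ho => ?_)
  have hlen : o.length = ds.length :=
    (PySem.List.perm_of_mem_permutations ho).length_eq
  rw [inner_eq_cnt k o ds.length hlen]

theorem sel_head {α : Type} (x : α) (xs : List α) : (x, xs) ∈ selections (x :: xs) := by
  simp [selections]

theorem sel_tail {α : Type} {d : α} {ys : List α} {xs : List α} (x : α)
    (h : (d, ys) ∈ selections xs) : (d, x :: ys) ∈ selections (x :: xs) := by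
  simp only [selections, List.mem_cons, List.mem_map]
  exact Or.inr ⟨(d, ys), h, rfl⟩

theorem selections_exchange {α : Type} :
    ∀ {l : List α} {d : α} {rest : List α} {e : α} {rest' : List α},
      (d, rest) ∈ selections l → (e, rest') ∈ selections rest →
      ∃ mid, (e, mid) ∈ selections l ∧ (d, rest') ∈ selections mid := by
  intro l
  induction l with
  | nil => intro d rest e rest' h _; simp [selections] at h
  | cons x xs ih =>
    intro d rest e rest' hd he
    simp only [selections, List.mem_cons, List.mem_map, Prod.mk.injEq] at hd
    rcases hd with ⟨rfl, rfl⟩ | ⟨⟨c, ys⟩, hq, rfl, rfl⟩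
    · exact ⟨_ :: rest', sel_tail _ he, sel_head _ _⟩
    · simp only [selections, List.mem_cons, List.mem_map, Prod.mk.injEq] at he
      rcases he with ⟨rfl, rfl⟩ | ⟨⟨e', ys'⟩, hq', rfl, rfl⟩
      · exact ⟨xs, sel_head _ _, hq⟩
      · obtain ⟨mid0, hm1, hm2⟩ := ih hq hq'
        exact ⟨_ :: mid0, sel_tail _ hm1, sel_tail _ hm2⟩

theorem bt_nonneg (k : Int) (ds : List (List Int)) : 0 ≤ bt k ds := by
  rw [bt_eq]
  exact altF_init_le k _ 0

theorem bt_mono_sub : ∀ (n : Nat) (l : List (List Int)) (d : List Int)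
    (rest : List (List Int)), l.length = n → (d, rest) ∈ selections l →
    ∀ k, bt k rest ≤ bt k l := by
  intro n
  induction n using Nat.strong_induction_on with
  | _ n ih =>
    intro l d rest hlen hsel k
    rw [bt_eq k rest]
    refine altF_le k ?_ 0 (bt_nonneg k l)
    rintro ⟨e, rest'⟩ hq hp
    dsimp only at hp ⊢
    obtain ⟨mid, hmid1, hmid2⟩ := selections_exchange hsel hq
    have hml : mid.length < n := by
      have h0 := selections_length hmid1; dsimp only at h0; omega
    have h1 : bt (k - pvGet e 1) rest' ≤ bt (k - pvGet e 1) mid :=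
      ih mid.length hml mid d rest' rfl hmid2 _
    have h2 : 1 + bt (k - pvGet e 1) mid ≤ bt k l := by
      rw [bt_eq k l]
      exact altF_le_of_mem k hmid1 hp 0
    omega

theorem cnt_le_bt : ∀ (n : Nat) (ds o : List (List Int)), ds.length = n →
    o ∈ PySem.List.permutations ds ds.length → ∀ k, cnt k o ≤ bt k ds := by
  intro n
  induction n using Nat.strong_induction_on with
  | _ n ih =>
    intro ds o hlen ho k
    cases ds with
    | nil =>
      simp only [List.length_nil, PySem.List.permutations, List.mem_singleton] at ho
      subst ho
      simpa [cnt] using bt_nonneg k []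
    | cons x xs =>
      obtain ⟨d, rest, hsel, o', ho', rfl⟩ := mem_permutations_cons.mp ho
      have hrl : rest.length < n := by
        have h0 := selections_length hsel; dsimp only at h0; omega
      rw [cnt_cons]
      split_ifs with h
      · have h1 : cnt (k - pvGet d 1) o' ≤ bt (k - pvGet d 1) rest :=
          ih rest.length hrl rest o' rfl ho' _
        have h2 : 1 + bt (k - pvGet d 1) rest ≤ bt k (x :: xs) := by
          rw [bt_eq k (x :: xs)]
          exact altF_le_of_mem k hsel h 0
        omega
      · have h1 : cnt k o' ≤ bt k rest := ih rest.length hrl rest o' rfl ho' k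
        have h2 := bt_mono_sub (x :: xs).length (x :: xs) d rest rfl hsel k
        omega

theorem bt_le_maxA : ∀ (n : Nat) (ds : List (List Int)), ds.length = n →
    ∀ k, bt k ds ≤ maxA k ds := by
  intro n
  induction n using Nat.strong_induction_on with
  | _ n ih =>
    intro ds hlen k
    cases ds with
    | nil => simp [bt_eq, selections, maxA, cnt, maxF]
    | cons x xs =>
      rw [bt_eq]
      refine altF_le k ?_ 0 (by unfold maxA; exact maxF_init_le k _ 0)
      rintro ⟨d, rest⟩ hq hp
      dsimp only at hp ⊢
      have hrl : rest.length < n := by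
        have h0 := selections_length hq; dsimp only at h0; omega
      have hIH : bt (k - pvGet d 1) rest ≤ maxA (k - pvGet d 1) rest :=
        ih rest.length hrl rest rfl _
      have hcnt : ∀ o' ∈ PySem.List.permutations rest rest.length,
          cnt (k - pvGet d 1) o' ≤ maxA k (x :: xs) - 1 := by
        intro o' ho'
        have hmem : d :: o' ∈ PySem.List.permutations (x :: xs) (x :: xs).length :=
          mem_permutations_cons.mpr ⟨d, rest, hq, o', ho', rfl⟩
        have h3 : cnt k (d :: o') ≤ maxA k (x :: xs) := maxF_le_of_mem k hmem 0
        rw [cnt_cons, if_pos hp] at h3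
        omega
      have hone : 1 ≤ maxA k (x :: xs) := by
        obtain ⟨o0, ho0⟩ := List.exists_mem_of_ne_nil _ (perms_ne_nil rest.length rest rfl)
        have := hcnt o0 ho0
        have := cnt_nonneg o0 (k - pvGet d 1)
        omega
      have h4 : maxA (k - pvGet d 1) rest ≤ maxA k (x :: xs) - 1 :=
        maxF_le _ hcnt 0 (by omega)
      omega

theorem sol_eq_bt (k : Int) (ds : List (List Int)) : solution k ds = bt k ds := by
  rw [solution_eq_maxA]
  apply le_antisymm
  · exact maxF_le k (fun o ho => cnt_le_bt ds.length ds o rfl ho k) 0 (bt_nonneg k ds)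
  · exact bt_le_maxA ds.length ds rfl k

-- ================= B side: the bitmask DP =================

def g (k : Int) (ds : List (List Int)) (m : Nat) : Option Int := bFeasF k ds m m

-- ---- bit arithmetic ----
theorem add_two_pow_eq_xor : ∀ (i m : Nat), m.testBit i = false → m + 2 ^ i = m ^^^ 2 ^ i := by
  intro i
  induction i with
  | zero =>
    intro m h
    simp only [Nat.testBit_zero, decide_eq_false_iff_not] at h
    have hm2 : m % 2 = 0 := by omega
    refine Nat.eq_of_testBit_eq (fun j => ?_)
    cases j with
    | zero =>
      rw [pow_zero, Nat.testBit_xor]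
      have h1 : (m + 1) % 2 = 1 := by omega
      simp [Nat.testBit_zero, h1, hm2]
    | succ j =>
      rw [pow_zero, Nat.testBit_xor]
      have h1 : (m + 1) / 2 = m / 2 := by omega
      have h2 : (1 : Nat).testBit (j + 1) = false := by
        rw [show (1 : Nat) = 2 ^ 0 from rfl, Nat.testBit_two_pow]
        simp
      rw [h2, Bool.xor_false, Nat.testBit_add_one, h1, ← Nat.testBit_add_one]
  | succ i ih =>
    intro m h
    rw [Nat.testBit_add_one] at h
    refine Nat.eq_of_testBit_eq (fun j => ?_)
    cases j with
    | zero =>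
      rw [Nat.testBit_xor]
      have h1 : (m + 2 ^ (i + 1)) % 2 = m % 2 := by
        have : 2 ^ (i + 1) = 2 * 2 ^ i := by ring
        omega
      have h2 : (2 ^ (i + 1)).testBit 0 = false := by
        rw [Nat.testBit_two_pow]; simp
      rw [h2, Bool.xor_false, Nat.testBit_zero, Nat.testBit_zero, h1]
    | succ j =>
      have h1 : (m + 2 ^ (i + 1)) / 2 = m / 2 + 2 ^ i := by
        have : 2 ^ (i + 1) = 2 * 2 ^ i := by ring
        omega
      have h2 : (2 ^ (i + 1)).testBit (j + 1) = decide (i = j) := by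
        rw [Nat.testBit_two_pow]; simp
      rw [Nat.testBit_xor, h2, Nat.testBit_add_one, h1, ih (m / 2) h, Nat.testBit_xor,
        ← Nat.testBit_add_one m, Nat.testBit_two_pow]

theorem testBit_add_two_pow_self {m i : Nat} (h : m.testBit i = false) :
    (m + 2 ^ i).testBit i = true := by
  rw [add_two_pow_eq_xor i m h, Nat.testBit_xor, h, Nat.testBit_two_pow]
  simp

theorem xor_add_two_pow {m i : Nat} (h : m.testBit i = false) :
    (m + 2 ^ i) ^^^ 2 ^ i = m := by
  rw [add_two_pow_eq_xor i m h, Nat.xor_assoc, Nat.xor_self, Nat.xor_zero]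

theorem exists_sub_of_testBit {m i : Nat} (h : m.testBit i = true) :
    ∃ m', m'.testBit i = false ∧ m = m' + 2 ^ i ∧ m ^^^ 2 ^ i = m' := by
  refine ⟨m ^^^ 2 ^ i, ?_, ?_, rfl⟩
  · rw [Nat.testBit_xor, h, Nat.testBit_two_pow]; simp
  · have hb : (m ^^^ 2 ^ i).testBit i = false := by
      rw [Nat.testBit_xor, h, Nat.testBit_two_pow]; simp
    rw [add_two_pow_eq_xor i _ hb, Nat.xor_assoc, Nat.xor_self, Nat.xor_zero]

theorem xor_lt_of_testBit {m i : Nat} (h : m.testBit i = true) : m ^^^ 2 ^ i < m := by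
  obtain ⟨m', _, h2, h3⟩ := exists_sub_of_testBit h
  have : 0 < 2 ^ i := Nat.two_pow_pos i
  omega

-- ---- popcount ----
theorem popcnt_eq (m : Nat) : popcnt m = m % 2 + popcnt (m / 2) := by
  cases m with
  | zero => simp [popcnt]
  | succ t => rw [popcnt]

theorem popcnt_add_two_pow : ∀ (i m : Nat), m.testBit i = false →
    popcnt (m + 2 ^ i) = popcnt m + 1 := by
  intro i
  induction i with
  | zero =>
    intro m h
    simp only [Nat.testBit_zero, decide_eq_false_iff_not] at h
    have hm2 : m % 2 = 0 := by omega
    rw [pow_zero, popcnt_eq (m + 1), popcnt_eq m]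
    have : (m + 1) / 2 = m / 2 := by omega
    rw [this]; omega
  | succ i ih =>
    intro m h
    rw [Nat.testBit_add_one] at h
    rw [popcnt_eq (m + 2 ^ (i + 1)), popcnt_eq m]
    have h2 : 2 ^ (i + 1) = 2 * 2 ^ i := by ring
    have h1 : (m + 2 ^ (i + 1)) / 2 = m / 2 + 2 ^ i := by omega
    have h0 : (m + 2 ^ (i + 1)) % 2 = m % 2 := by omega
    rw [h0, h1, ih (m / 2) h]; omega

-- ---- df: the list of dungeons whose index bit is NOT set in the mask ----
def df : List (List Int) → Nat → List (List Int)
  | [], _ => []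
  | x :: xs, m => if m % 2 = 1 then df xs (m / 2) else x :: df xs (m / 2)

theorem df_zero : ∀ (ds : List (List Int)), df ds 0 = ds := by
  intro ds
  induction ds with
  | nil => rfl
  | cons x xs ih => simp [df, ih]

theorem mem_selections_df : ∀ (ds : List (List Int)) (m : Nat) (d : List Int)
    (rest : List (List Int)),
    ((d, rest) ∈ selections (df ds m)) ↔
      ∃ i : Nat, i < ds.length ∧ m.testBit i = false ∧ d = ds.getD i [] ∧
        rest = df ds (m + 2 ^ i) := by
  intro ds
  induction ds with
  | nil =>
    intro m d rest
    simp [df, selections]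
  | cons x xs ih =>
    intro m d rest
    by_cases hm : m % 2 = 1
    · rw [show df (x :: xs) m = df xs (m / 2) from by simp [df, hm]]
      rw [ih (m / 2) d rest]
      constructor
      · rintro ⟨j, hj, hb, rfl, rfl⟩
        refine ⟨j + 1, by simpa using hj, by rw [Nat.testBit_add_one]; exact hb, by simp, ?_⟩
        have h2 : 2 ^ (j + 1) = 2 * 2 ^ j := by ring
        have hmod : (m + 2 ^ (j + 1)) % 2 = 1 := by omega
        have hdiv : (m + 2 ^ (j + 1)) / 2 = m / 2 + 2 ^ j := by omega
        simp [df, hmod, hdiv]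
      · rintro ⟨i, hi, hb, rfl, rfl⟩
        cases i with
        | zero =>
          rw [Nat.testBit_zero] at hb
          simp at hb
          omega
        | succ j =>
          rw [Nat.testBit_add_one] at hb
          refine ⟨j, by simpa using hi, hb, by simp, ?_⟩
          have h2 : 2 ^ (j + 1) = 2 * 2 ^ j := by ring
          have hmod : (m + 2 ^ (j + 1)) % 2 = 1 := by omega
          have hdiv : (m + 2 ^ (j + 1)) / 2 = m / 2 + 2 ^ j := by omega
          simp [df, hmod, hdiv]
    · have hm0 : m % 2 = 0 := by omega
      rw [show df (x :: xs) m = x :: df xs (m / 2) from by simp [df, hm]]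
      simp only [selections, List.mem_cons, List.mem_map, Prod.mk.injEq]
      constructor
      · rintro (⟨rfl, rfl⟩ | ⟨⟨e, ys⟩, hq, rfl, rfl⟩)
        · refine ⟨0, by simp, by simp [Nat.testBit_zero]; omega, by simp, ?_⟩
          have hmod : (m + 1) % 2 = 1 := by omega
          have hdiv : (m + 1) / 2 = m / 2 := by omega
          simp [df, hmod, hdiv]
        · obtain ⟨j, hj, hb, rfl, rfl⟩ := (ih (m / 2) e ys).mp hq
          refine ⟨j + 1, by simpa using hj, by rw [Nat.testBit_add_one]; exact hb, by simp, ?_⟩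
          have h2 : 2 ^ (j + 1) = 2 * 2 ^ j := by ring
          have hmod : (m + 2 ^ (j + 1)) % 2 = 0 := by omega
          have hdiv : (m + 2 ^ (j + 1)) / 2 = m / 2 + 2 ^ j := by omega
          simp [df, hmod, hdiv]
      · rintro ⟨i, hi, hb, rfl, rfl⟩
        cases i with
        | zero =>
          left
          have hmod : (m + 1) % 2 = 1 := by omega
          have hdiv : (m + 1) / 2 = m / 2 := by omega
          exact ⟨by simp, by simp [df, hmod, hdiv]⟩
        | succ j =>
          right
          rw [Nat.testBit_add_one] at hb
          refine ⟨(xs.getD j [], df xs (m / 2 + 2 ^ j)),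
            (ih (m / 2) _ _).mpr ⟨j, by simpa using hi, hb, rfl, rfl⟩, by simp, ?_⟩
          have h2 : 2 ^ (j + 1) = 2 * 2 ^ j := by ring
          have hmod : (m + 2 ^ (j + 1)) % 2 = 0 := by omega
          have hdiv : (m + 2 ^ (j + 1)) / 2 = m / 2 + 2 ^ j := by omega
          simp [df, hmod, hdiv]

-- ---- fuel irrelevance and the abstract fold shape of bFeasF ----
def cnd (k : Int) (ds : List (List Int)) (M : Nat) (i : Nat) : Option Int :=
  if M.testBit i then
    match g k ds (M ^^^ (1 <<< i)) with
    | some prev =>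
      if prev ≥ pvGet (ds.getD i []) 0 then some (prev - pvGet (ds.getD i []) 1) else none
    | none => none
  else none

def fstep (c : Nat → Option Int) (res : Option Int) (i : Nat) : Option Int :=
  match c i with
  | none => res
  | some v =>
    match res with
    | none => some v
    | some b => if b < v then some v else res

theorem bFeasF_fuel (k : Int) (ds : List (List Int)) : ∀ (m : Nat) (f1 f2 : Nat),
    m ≤ f1 → m ≤ f2 → bFeasF k ds f1 m = bFeasF k ds f2 m := by
  intro m
  induction m using Nat.strong_induction_on with
  | _ m ih =>
    intro f1 f2 h1 h2
    cases m with
    | zero => cases f1 <;> cases f2 <;> rfl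
    | succ t =>
      obtain ⟨g1, rfl⟩ : ∃ g1, f1 = g1 + 1 := ⟨f1 - 1, by omega⟩
      obtain ⟨g2, rfl⟩ : ∃ g2, f2 = g2 + 1 := ⟨f2 - 1, by omega⟩
      simp only [bFeasF]
      refine PySem.List.foldl_congr_mem _ _ _ _ (fun res i hi => ?_)
      by_cases hb : (t + 1).testBit i
      · have hlt : (t + 1) ^^^ (1 <<< i) < t + 1 := by
          rw [Nat.one_shiftLeft]
          exact xor_lt_of_testBit hb
        rw [if_pos hb, if_pos hb,
          ih ((t + 1) ^^^ (1 <<< i)) hlt g1 g2 (by omega) (by omega)]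
      · rw [if_neg hb, if_neg hb]

theorem g_succ (k : Int) (ds : List (List Int)) (t : Nat) :
    g k ds (t + 1) = (List.range ds.length).foldl (fstep (cnd k ds (t + 1))) none := by
  show bFeasF k ds (t + 1) (t + 1) = _
  simp only [bFeasF]
  refine PySem.List.foldl_congr_mem _ _ _ _ (fun res i hi => ?_)
  by_cases hb : (t + 1).testBit i
  · have hlt : (t + 1) ^^^ (1 <<< i) < t + 1 := by
      rw [Nat.one_shiftLeft]; exact xor_lt_of_testBit hb
    rw [if_pos hb]
    have hg : bFeasF k ds t ((t + 1) ^^^ (1 <<< i)) = g k ds ((t + 1) ^^^ (1 <<< i)) :=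
      bFeasF_fuel k ds _ t _ (by omega) (le_refl _)
    rw [hg]
    simp only [fstep, cnd, if_pos hb]
    cases g k ds ((t + 1) ^^^ (1 <<< i)) with
    | none => rfl
    | some prev =>
      show (if prev ≥ pvGet (ds.getD i []) 0 then _ else _) = _
      dsimp only
      split_ifs <;> rfl
  · rw [if_neg hb]
    simp [fstep, cnd, hb]

theorem g_zero (k : Int) (ds : List (List Int)) : g k ds 0 = some k := rfl

-- ---- generic lemmas about the fstep fold ----
theorem fstep_some (c : Nat → Option Int) (i : Nat) (b : Int) :
    ∃ b', fstep c (some b) i = some b' ∧ b ≤ b' := by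
  unfold fstep
  cases c i with
  | none => exact ⟨b, rfl, le_refl b⟩
  | some v =>
    by_cases hv : b < v
    · exact ⟨v, by simp [hv], by omega⟩
    · exact ⟨b, by simp [hv], le_refl b⟩

theorem fstep_grow (c : Nat → Option Int) :
    ∀ (l : List Nat) (res : Option Int) (b : Int), res = some b →
      ∃ r, l.foldl (fstep c) res = some r ∧ b ≤ r := by
  intro l
  induction l with
  | nil => intro res b h; exact ⟨b, by simp [h], le_refl b⟩
  | cons i l ih =>
    intro res b h
    subst h
    rw [List.foldl_cons]
    obtain ⟨b', hb', hbb'⟩ := fstep_some c i b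
    rw [hb']
    obtain ⟨r, hr, hbr⟩ := ih (some b') b' rfl
    exact ⟨r, hr, by omega⟩

theorem fstep_sound (c : Nat → Option Int) :
    ∀ (l : List Nat) (res : Option Int) (r : Int),
      l.foldl (fstep c) res = some r → res = some r ∨ ∃ i ∈ l, c i = some r := by
  intro l
  induction l with
  | nil => intro res r h; exact Or.inl (by simpa using h)
  | cons i l ih =>
    intro res r h
    simp only [List.foldl_cons] at h
    rcases ih _ r h with h1 | ⟨j, hj, hc⟩
    · simp only [fstep] at h1
      cases hc : c i with
      | none =>
        rw [hc] at h1
        exact Or.inl h1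
      | some v =>
        rw [hc] at h1
        cases res with
        | none =>
          simp at h1
          exact Or.inr ⟨i, List.mem_cons_self, by rw [hc, h1]⟩
        | some b =>
          by_cases hv : b < v
          · simp [hv] at h1
            exact Or.inr ⟨i, List.mem_cons_self, by rw [hc, h1]⟩
          · simp [hv] at h1
            exact Or.inl (by rw [h1])
    · exact Or.inr ⟨j, List.mem_cons_of_mem _ hj, hc⟩

theorem fstep_max (c : Nat → Option Int) :
    ∀ (l : List Nat) (res : Option Int) (i : Nat) (v : Int), i ∈ l → c i = some v →
      ∃ r, l.foldl (fstep c) res = some r ∧ v ≤ r := by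
  intro l
  induction l with
  | nil => intro res i v h; simp at h
  | cons j l ih =>
    intro res i v hi hc
    simp only [List.foldl_cons]
    rcases List.mem_cons.mp hi with rfl | hmem
    · have : ∃ b, fstep c res i = some b ∧ v ≤ b := by
        simp only [fstep, hc]
        cases res with
        | none => exact ⟨v, rfl, le_refl v⟩
        | some b =>
          by_cases hv : b < v
          · exact ⟨v, by simp [hv], le_refl v⟩
          · exact ⟨b, by simp [hv], by omega⟩
      obtain ⟨b, hb, hvb⟩ := this
      obtain ⟨r, hr, hbr⟩ := fstep_grow c l _ b hb
      exact ⟨r, hr, by omega⟩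
    · exact ih _ i v hmem hc

-- ---- characterisation of g ----
theorem g_sound {k : Int} {ds : List (List Int)} {m : Nat} {r : Int}
    (hm : m ≠ 0) (h : g k ds m = some r) :
    ∃ i, i < ds.length ∧ cnd k ds m i = some r := by
  obtain ⟨t, rfl⟩ : ∃ t, m = t + 1 := ⟨m - 1, by omega⟩
  rw [g_succ] at h
  rcases fstep_sound _ _ _ _ h with h1 | ⟨i, hi, hc⟩
  · simp at h1
  · exact ⟨i, List.mem_range.mp hi, hc⟩

theorem g_max {k : Int} {ds : List (List Int)} {m : Nat} {i : Nat} {v : Int}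
    (hm : m ≠ 0) (hi : i < ds.length) (hc : cnd k ds m i = some v) :
    ∃ r, g k ds m = some r ∧ v ≤ r := by
  obtain ⟨t, rfl⟩ : ∃ t, m = t + 1 := ⟨m - 1, by omega⟩
  rw [g_succ]
  exact fstep_max _ _ none i v (List.mem_range.mpr hi) hc

-- ---- energy monotonicity of bt ----
theorem bt_mono_k : ∀ (n : Nat) (ds : List (List Int)), ds.length = n →
    ∀ (k1 k2 : Int), k1 ≤ k2 → bt k1 ds ≤ bt k2 ds := by
  intro n
  induction n using Nat.strong_induction_on with
  | _ n ih =>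
    intro ds hlen k1 k2 hk
    rw [bt_eq k1 ds]
    refine altF_le k1 ?_ 0 (bt_nonneg k2 ds)
    rintro ⟨d, rest⟩ hq hp
    dsimp only at hp ⊢
    have hrl : rest.length < n := by
      have h0 := selections_length hq; dsimp only at h0; omega
    have h1 : bt (k1 - pvGet d 1) rest ≤ bt (k2 - pvGet d 1) rest :=
      ih rest.length hrl rest rfl (k1 - pvGet d 1) (k2 - pvGet d 1) (by omega)
    have h2 : 1 + bt (k2 - pvGet d 1) rest ≤ bt k2 ds := by
      rw [bt_eq k2 ds]
      exact altF_le_of_mem k2 hq (by dsimp only; omega) 0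
    omega

-- ---- the answer fold of solution_alt ----
def ansF (k : Int) (ds : List (List Int)) : Int → Nat → Int := fun answer mask =>
  if (g k ds mask).isSome then max answer ((popcnt mask : Int)) else answer

theorem solution_alt_eq_ans (k : Int) (ds : List (List Int)) :
    solution_alt k ds = (List.range (2 ^ ds.length)).foldl (ansF k ds) 0 := rfl

theorem ansF_init_le (k : Int) (ds : List (List Int)) :
    ∀ (l : List Nat) (a : Int), a ≤ l.foldl (ansF k ds) a := by
  intro l
  induction l with
  | nil => intro a; simp
  | cons m l ih =>
    intro a
    simp only [List.foldl_cons, ansF]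
    split_ifs
    · exact le_trans (le_max_left _ _) (ih _)
    · exact ih a

theorem ansF_le_of_mem (k : Int) (ds : List (List Int)) {l : List Nat} {m : Nat}
    (hm : m ∈ l) (hs : (g k ds m).isSome) :
    ∀ a, (popcnt m : Int) ≤ l.foldl (ansF k ds) a := by
  induction l with
  | nil => simp at hm
  | cons m' l ih =>
    intro a
    simp only [List.foldl_cons]
    rcases List.mem_cons.mp hm with rfl | hmem
    · refine le_trans ?_ (ansF_init_le k ds l _)
      simp only [ansF, if_pos hs]
      exact le_max_right _ _
    · exact ih hmem _

theorem ansF_le (k : Int) (ds : List (List Int)) {l : List Nat} {M : Int}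
    (h : ∀ m ∈ l, (g k ds m).isSome → (popcnt m : Int) ≤ M) :
    ∀ a, a ≤ M → l.foldl (ansF k ds) a ≤ M := by
  induction l with
  | nil => intro a ha; simpa
  | cons m l ih =>
    intro a ha
    simp only [List.foldl_cons, ansF]
    split_ifs with hs
    · exact ih (fun m' hm' => h m' (List.mem_cons_of_mem _ hm')) _
        (max_le ha (h m List.mem_cons_self hs))
    · exact ih (fun m' hm' => h m' (List.mem_cons_of_mem _ hm')) _ ha

-- ---- L1: feasible mask ⇒ its popcount (plus the rest of bt) fits below bt ----
theorem feas_le_bt (k : Int) (ds : List (List Int)) : ∀ (m : Nat) (r : Int),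
    g k ds m = some r → (popcnt m : Int) + bt r (df ds m) ≤ bt k ds := by
  intro m
  induction m using Nat.strong_induction_on with
  | _ m ih =>
    intro r hr
    cases Nat.eq_zero_or_pos m with
    | inl h0 =>
      subst h0
      rw [g_zero] at hr
      cases hr
      simp [popcnt, df_zero]
    | inr hpos =>
      obtain ⟨i, hi, hc⟩ := g_sound (by omega) hr
      simp only [cnd, Nat.one_shiftLeft] at hc
      by_cases hb : m.testBit i
      · rw [if_pos hb] at hc
        obtain ⟨m', hm'b, rfl, hm'x⟩ := exists_sub_of_testBit hb
        rw [hm'x] at hc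
        cases hprev : g k ds m' with
        | none => rw [hprev] at hc; simp at hc
        | some prev =>
          rw [hprev] at hc
          dsimp only at hc
          by_cases hp : prev ≥ pvGet (ds.getD i []) 0
          · rw [if_pos hp] at hc
            have hrv : r = prev - pvGet (ds.getD i []) 1 := by
              simpa using hc.symm
            have hlt : m' < m' + 2 ^ i := by
              have : 0 < 2 ^ i := Nat.two_pow_pos i
              omega
            have hIH := ih m' hlt prev hprev
            have hsel : (ds.getD i [], df ds (m' + 2 ^ i)) ∈ selections (df ds m') :=
              (mem_selections_df ds m' _ _).mpr ⟨i, hi, hm'b, rfl, rfl⟩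
            have hbranch : 1 + bt (prev - pvGet (ds.getD i []) 1) (df ds (m' + 2 ^ i)) ≤
                bt prev (df ds m') := by
              rw [bt_eq prev (df ds m')]
              exact altF_le_of_mem prev hsel hp 0
            have hpc : popcnt (m' + 2 ^ i) = popcnt m' + 1 := popcnt_add_two_pow i m' hm'b
            rw [hrv]
            have hnn := bt_nonneg (prev - pvGet (ds.getD i []) 1) (df ds (m' + 2 ^ i))
            simp only [hpc]
            push_cast
            push_cast at hIH
            omega
          · rw [if_neg hp] at hc; simp at hc
      · rw [if_neg hb] at hc; simp at hc

-- ---- L2: bt from any feasible mask fits below the answer ----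
theorem bt_le_ans (k : Int) (ds : List (List Int)) : ∀ (t m : Nat), 2 ^ ds.length - m = t →
    m < 2 ^ ds.length → ∀ (r : Int), g k ds m = some r →
    bt r (df ds m) + (popcnt m : Int) ≤
      (List.range (2 ^ ds.length)).foldl (ansF k ds) 0 := by
  intro t
  induction t using Nat.strong_induction_on with
  | _ t ih =>
    intro m hmt hmlt r hr
    have hpcle : (popcnt m : Int) ≤ (List.range (2 ^ ds.length)).foldl (ansF k ds) 0 :=
      ansF_le_of_mem k ds (List.mem_range.mpr hmlt) (by rw [hr]; rfl) 0
    rw [bt_eq]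
    have hub : (selections (df ds m)).foldl (altF r) 0 ≤
        (List.range (2 ^ ds.length)).foldl (ansF k ds) 0 - (popcnt m : Int) := by
      refine altF_le r ?_ 0 (by omega)
      rintro ⟨d, rest⟩ hq hp
      dsimp only at hp ⊢
      obtain ⟨i, hi, hbi, rfl, rfl⟩ := (mem_selections_df ds m _ _).mp hq
      -- the larger mask m + 2^i is feasible with value ≥ r - cost
      have hbig : (m + 2 ^ i).testBit i = true := testBit_add_two_pow_self hbi
      have hxor : (m + 2 ^ i) ^^^ 2 ^ i = m := xor_add_two_pow hbi
      have hcnd : cnd k ds (m + 2 ^ i) i = some (r - pvGet (ds.getD i []) 1) := by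
        simp only [cnd, Nat.one_shiftLeft, if_pos hbig, hxor, hr, if_pos hp]
      have hne : m + 2 ^ i ≠ 0 := by positivity
      obtain ⟨r', hr', hvr'⟩ := g_max hne hi hcnd
      -- m + 2^i stays below 2^len
      have h2i : 2 ^ i < 2 ^ ds.length := Nat.pow_lt_pow_right (by omega) hi
      have hblt : m + 2 ^ i < 2 ^ ds.length := by
        rw [add_two_pow_eq_xor i m hbi]
        exact Nat.xor_lt_two_pow hmlt h2i
      have hmeasure : 2 ^ ds.length - (m + 2 ^ i) < t := by
        have : 0 < 2 ^ i := Nat.two_pow_pos i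
        omega
      have hIH := ih _ hmeasure (m + 2 ^ i) rfl hblt r' hr'
      have hmono : bt (r - pvGet (ds.getD i []) 1) (df ds (m + 2 ^ i)) ≤
          bt r' (df ds (m + 2 ^ i)) :=
        bt_mono_k (df ds (m + 2 ^ i)).length _ rfl _ _ hvr'
      have hpc : popcnt (m + 2 ^ i) = popcnt m + 1 := popcnt_add_two_pow i m hbi
      rw [hpc] at hIH
      push_cast at hIH ⊢
      omega
    omega

theorem bt_eq_alt (k : Int) (ds : List (List Int)) : bt k ds = solution_alt k ds := by
  rw [solution_alt_eq_ans]
  apply le_antisymm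
  · have h := bt_le_ans k ds (2 ^ ds.length - 0) 0 rfl (Nat.two_pow_pos _) k rfl
    rw [df_zero] at h
    simpa [popcnt] using h
  · refine ansF_le k ds ?_ 0 (bt_nonneg k ds)
    intro m _ hs
    obtain ⟨r, hr⟩ := Option.isSome_iff_exists.mp hs
    have := feas_le_bt k ds m r hr
    have := bt_nonneg r (df ds m)
    omega

-- ===== VERDICT (by name: the statement is the Claim_ definition above) =====
theorem solution_spec : Claim_equal_solution := by
  intro k ds _ _
  unfold Spec_solution
  rw [sol_eq_bt, bt_eq_alt]
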